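-- pv_equiv track=rewrite | github.com/evellinmoura/ListaEncadeada | questao9.py | prefixo_para_posfixa
-- ===== SOURCE A (Python) =====
-- class ArrayStack:
--     def __init__(self):
--         self._data = []
--
--     def is_empty(self):
--         return len(self._data) == 0
--
--     def push(self, item):
--         self._data.append(item)
--
--     def pop(self):
--         return self._data.pop()
--
--     def top(self):
--         return self._data[-1]
--
-- def eh_operador(char):
--     """Verifica se é um operador"""
--     return char in ['+', '-', '*', '/', '^']
--
-- def prefixo_para_posfixa(expressao):
--     """Converte notacao prefixada para pos-fixada"""
--     pilha = ArrayStack()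
--
--     # le da direita para esquerda
--     for i in range(len(expressao) - 1, -1, -1):
--         char = expressao[i]
--
--         if eh_operador(char):
--
--             op1 = pilha.pop()
--             op2 = pilha.pop()
--
--             temp = f"{op1}{op2}{char}"
--             pilha.push(temp)
--         else:
--
--             pilha.push(char)
--
--     return pilha.pop()
-- ===== SOURCE B (Python) =====
-- def eh_operador(char):
--     """Verifica se é um operador"""
--     return char in ['+', '-', '*', '/', '^']
--
-- def prefixo_para_posfixa(expressao):
--     """Converte notacao prefixada para pos-fixada.
--     Left-to-right shift-reduce parse: operators wait on a stack for their two
--     operands; the scan stops as soon as the leftmost expression is complete."""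
--     stack = []  # frames [operator, left-operand-or-None]
--     i = 0
--     while True:
--         ch = expressao[i]
--         i += 1
--         if eh_operador(ch):
--             stack.append([ch, None])
--         else:
--             cur = ch
--             while True:
--                 if not stack:
--                     return cur
--                 if stack[-1][1] is None:
--                     stack[-1][1] = cur
--                     break
--                 op, left = stack.pop()
--                 cur = left + cur + op
-- ===== Notes on version B (the rewrite author's own statement) =====
-- stated objective: alternative
-- what changed: Replaced A's right-to-left full-scan stack machine (operands pushed, operators pop two) by a single left-to-right shift-reduce parse that pushes pending operators with their partial left operand and returns as soon as the leftmost expression is complete, so trailing characters are never read.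
import Mathlib
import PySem

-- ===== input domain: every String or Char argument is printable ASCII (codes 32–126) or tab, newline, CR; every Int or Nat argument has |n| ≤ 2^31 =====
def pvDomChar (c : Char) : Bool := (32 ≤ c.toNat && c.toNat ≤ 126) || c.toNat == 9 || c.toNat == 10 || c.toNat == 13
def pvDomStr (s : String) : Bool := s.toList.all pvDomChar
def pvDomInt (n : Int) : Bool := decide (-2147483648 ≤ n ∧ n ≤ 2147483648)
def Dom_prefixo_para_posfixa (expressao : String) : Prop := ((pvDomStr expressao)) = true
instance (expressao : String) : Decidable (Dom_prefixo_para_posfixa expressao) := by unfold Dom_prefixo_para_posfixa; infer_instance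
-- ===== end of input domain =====

-- B replaces A's right-to-left stack machine by a single left-to-right shift-reduce
-- parse that stops at the leftmost complete expression (objective: alternative).


-- ===== PORT A =====
def eh_operador (c : Char) : Bool := ['+', '-', '*', '/', '^'].contains c

-- one iteration of A's loop body on the ArrayStack (head = top); none = pop on empty (IndexError)
def stepA (st : List String) (c : Char) : Option (List String) :=
  if eh_operador c then
    match st with
    | op1 :: op2 :: rest => some ((op1 ++ op2 ++ c.toString) :: rest)
    | _ => none
  else
    some (c.toString :: st)

-- 'for i in range(len(e)-1, -1, -1): char = e[i]' is exactly a left fold over the reversed char list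
def prefixo_para_posfixa (expressao : String) : String :=
  ((expressao.toList.reverse.foldlM stepA []).bind List.head?).getD ""

-- ===== PORT B =====
-- inner while loop of Source B: reduce cur against the frame stack; .inl = stack empty, return;
-- .inr = cur attached as a left operand, keep scanning
def reduceB (cur : String) : List (Char × Option String) → String ⊕ List (Char × Option String)
  | [] => .inl cur
  | (op, none) :: rest => .inr ((op, some cur) :: rest)
  | (op, some left) :: rest => reduceB (left ++ cur ++ op.toString) rest

-- outer while loop of Source B: consume one char per iteration; none = expressao[i] IndexError
def loopB : List Char → List (Char × Option String) → Option String
  | [], _ => none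
  | c :: cs, stack =>
    if eh_operador c then
      loopB cs ((c, none) :: stack)
    else
      match reduceB c.toString stack with
      | .inl res => some res
      | .inr stack' => loopB cs stack'

def prefixo_para_posfixa_alt (expressao : String) : String :=
  (loopB expressao.toList []).getD ""

-- ===== PRECONDITION & SPEC =====
-- weight of a char for the operand/operator balance: operators need two operands
def pvWt (c : Char) : Int := if eh_operador c then 1 else -1
def pvBal (cs : List Char) : Int := (cs.map pvWt).sum

-- Pre_ = exactly the inputs where A returns normally (elsewhere A's pops raise IndexError):
-- the whole string leaves a non-empty stack, and every operator has two complete operands after it.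
def Pre_prefixo_para_posfixa (expressao : String) : Prop :=
  pvBal expressao.toList ≤ -1 ∧
  ∀ i : Nat, (h : i < expressao.toList.length) → eh_operador (expressao.toList[i]'h) = true →
    pvBal (expressao.toList.drop (i + 1)) ≤ -2

instance (expressao : String) : Decidable (Pre_prefixo_para_posfixa expressao) := by
  unfold Pre_prefixo_para_posfixa; infer_instance

def pvWitness_prefixo_para_posfixa : String := "+a*bc"

def Spec_prefixo_para_posfixa (expressao : String) (out : String) : Prop := out = prefixo_para_posfixa_alt expressao
instance (expressao : String) (out : String) : Decidable (Spec_prefixo_para_posfixa expressao out) := by unfold Spec_prefixo_para_posfixa; infer_instance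

-- ===== CLAIM (what is proved, stated in full; the proofs are below) =====
def Claim_equal_prefixo_para_posfixa : Prop := ∀ (expressao : String), Dom_prefixo_para_posfixa expressao → Pre_prefixo_para_posfixa expressao → Spec_prefixo_para_posfixa expressao (prefixo_para_posfixa expressao)

-- ===== LEMMAS AND PROOFS =====

theorem pvBal_append (l r : List Char) : pvBal (l ++ r) = pvBal l + pvBal r := by
  simp [pvBal]

theorem pvBal_reverse (l : List Char) : pvBal l.reverse = pvBal l := by
  simp [pvBal, List.sum_reverse]

-- ghost helper (proof only): recursive-descent parse of one prefix expression
def parseG : Nat → List Char → Option (String × List Char)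
  | 0, _ => none
  | _ + 1, [] => none
  | fuel + 1, c :: rest =>
    if eh_operador c then
      match parseG fuel rest with
      | none => none
      | some (l, r1) =>
        match parseG fuel r1 with
        | none => none
        | some (rr, r2) => some (l ++ rr ++ c.toString, r2)
    else
      some (c.toString, rest)

-- every operator in cs is followed by at least two complete operands
def CondOps (cs : List Char) : Prop :=
  ∀ l c r, cs = l ++ c :: r → eh_operador c = true → pvBal r ≤ -2

theorem condOps_suffix (l r : List Char) (h : CondOps (l ++ r)) : CondOps r := by
  intro a d b hr hop
  exact h (l ++ a) d b (by simp [hr]) hop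

-- A's fold succeeds whenever every operator sees a stack of size ≥ 2
theorem foldR (rs : List Char) : ∀ st : List String,
    (∀ l c r, rs = l ++ c :: r → eh_operador c = true → (2 : Int) ≤ (st.length : Int) - pvBal l) →
    ∃ st', List.foldlM stepA st rs = some st' ∧ (st'.length : Int) = (st.length : Int) - pvBal rs := by
  induction rs with
  | nil => intro st _; exact ⟨st, by simp, by simp [pvBal]⟩
  | cons c rs' ih =>
    intro st hcond
    by_cases hop : eh_operador c = true
    · have h2 : (2 : Int) ≤ (st.length : Int) - pvBal [] := hcond [] c rs' rfl hop
      simp [pvBal] at h2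
      match st, h2 with
      | a :: b :: st2, _ =>
        have hstep : stepA (a :: b :: st2) c = some ((a ++ b ++ c.toString) :: st2) := by
          simp [stepA, hop]
        obtain ⟨st', h1, h2'⟩ := ih ((a ++ b ++ c.toString) :: st2) (by
          intro l d r hsplit hd
          have := hcond (c :: l) d r (by simp [hsplit]) hd
          simp [pvBal, pvWt, hop] at this ⊢
          omega)
        refine ⟨st', by rw [List.foldlM_cons, hstep]; simpa using h1, ?_⟩
        simp [pvBal, pvWt, hop] at h2' ⊢
        omega
    · have hstep : stepA st c = some (c.toString :: st) := by simp [stepA, hop]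
      obtain ⟨st', h1, h2'⟩ := ih (c.toString :: st) (by
        intro l d r hsplit hd
        have := hcond (c :: l) d r (by simp [hsplit]) hd
        simp [pvBal, pvWt, hop] at this ⊢
        omega)
      refine ⟨st', by rw [List.foldlM_cons, hstep]; simpa using h1, ?_⟩
      simp [pvBal, pvWt, hop] at h2' ⊢
      omega

-- a successful parse consumes a prefix of weight -1 whose right-to-left fold pushes exactly its postfix
theorem parse_decomp : ∀ fuel cs s rest, parseG fuel cs = some (s, rest) →
    ∃ pre, cs = pre ++ rest ∧ pvBal pre = -1 ∧
      ∀ st : List String, List.foldlM stepA st pre.reverse = some (s :: st) := by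
  intro fuel
  induction fuel with
  | zero => intro cs s rest h; simp [parseG] at h
  | succ f ih =>
    intro cs s rest h
    match cs with
    | [] => simp [parseG] at h
    | c :: cs' =>
      by_cases hop : eh_operador c = true
      · simp only [parseG, hop, if_pos] at h
        match h1 : parseG f cs' with
        | none => simp [h1] at h
        | some (l, r1) =>
          simp only [h1] at h
          match h2 : parseG f r1 with
          | none => simp [h2] at h
          | some (rr, r2) =>
            simp only [h2, Option.some.injEq, Prod.mk.injEq] at h
            obtain ⟨hs, hrest⟩ := h
            subst hs; subst hrest
            obtain ⟨preL, hL1, hL2, hL3⟩ := ih cs' l r1 h1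
            obtain ⟨preR, hR1, hR2, hR3⟩ := ih r1 rr r2 h2
            refine ⟨c :: preL ++ preR, by simp [hL1, hR1], ?_, ?_⟩
            · simp [pvBal, pvWt, hop] at hL2 hR2 ⊢; omega
            · intro st
              simp [List.foldlM_append, hR3, hL3, stepA, hop]
      · simp only [parseG, hop, if_neg, Bool.false_eq_true, not_false_iff, Option.some.injEq,
          Prod.mk.injEq] at h
        obtain ⟨hs, hrest⟩ := h
        subst hs; subst hrest
        exact ⟨[c], by simp, by simp [pvBal, pvWt, hop], fun st => by
          simp [List.foldlM_cons, stepA, hop]⟩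

-- under the operator condition the ghost parser succeeds
theorem parse_success : ∀ fuel cs, cs.length ≤ fuel → cs ≠ [] → CondOps cs →
    ∃ s rest, parseG fuel cs = some (s, rest) := by
  intro fuel
  induction fuel with
  | zero =>
    intro cs hlen hne _
    cases cs with
    | nil => exact absurd rfl hne
    | cons c cs' => simp at hlen
  | succ f ih =>
    intro cs hlen hne hcond
    match cs with
    | [] => exact absurd rfl hne
    | c :: cs' =>
      by_cases hop : eh_operador c = true
      · have hbal : pvBal cs' ≤ -2 := hcond [] c cs' rfl hop
        have hne' : cs' ≠ [] := by
          intro h; rw [h] at hbal; simp [pvBal] at hbal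
        have hcond' : CondOps cs' := condOps_suffix [c] cs' hcond
        have hlen' : cs'.length ≤ f := by simp at hlen; omega
        obtain ⟨l, r1, h1⟩ := ih cs' hlen' hne' hcond'
        obtain ⟨preL, hL1, hL2, _⟩ := parse_decomp f cs' l r1 h1
        have hbr1 : pvBal r1 ≤ -1 := by
          rw [hL1, pvBal_append, hL2] at hbal; omega
        have hner1 : r1 ≠ [] := by
          intro h; rw [h] at hbr1; simp [pvBal] at hbr1
        have hlenr1 : r1.length ≤ f := by
          have : cs'.length = preL.length + r1.length := by rw [hL1]; simp
          omega
        have hcondr1 : CondOps r1 := condOps_suffix (c :: preL) r1 (by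
          simpa [hL1] using hcond)
        obtain ⟨rr, r2, h2⟩ := ih r1 hlenr1 hner1 hcondr1
        exact ⟨l ++ rr ++ c.toString, r2, by simp [parseG, hop, h1, h2]⟩
      · exact ⟨c.toString, cs', by simp [parseG, hop]⟩

-- B's loop, run from any frame stack, is governed by the ghost parse of the first expression
theorem loop_via_parse : ∀ fuel cs s rest, parseG fuel cs = some (s, rest) →
    ∀ stack, loopB cs stack =
      (match reduceB s stack with
       | .inl r => some r
       | .inr stack' => loopB rest stack') := by
  intro fuel
  induction fuel with
  | zero => intro cs s rest h; simp [parseG] at h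
  | succ f ih =>
    intro cs s rest h stack
    match cs with
    | [] => simp [parseG] at h
    | c :: cs' =>
      by_cases hop : eh_operador c = true
      · simp only [parseG, hop, if_pos] at h
        match h1 : parseG f cs' with
        | none => simp [h1] at h
        | some (l, r1) =>
          simp only [h1] at h
          match h2 : parseG f r1 with
          | none => simp [h2] at h
          | some (rr, r2) =>
            simp only [h2, Option.some.injEq, Prod.mk.injEq] at h
            obtain ⟨hs, hrest⟩ := h
            subst hs; subst hrest
            have step1 : loopB (c :: cs') stack = loopB cs' ((c, none) :: stack) := by
              simp [loopB, hop]
            rw [step1, ih cs' l r1 h1 ((c, none) :: stack)]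
            simp only [reduceB]
            rw [ih r1 rr r2 h2 ((c, some l) :: stack)]
            simp only [reduceB]
      · simp only [parseG, hop, if_neg, Bool.false_eq_true, not_false_iff, Option.some.injEq,
          Prod.mk.injEq] at h
        obtain ⟨hs, hrest⟩ := h
        subst hs; subst hrest
        simp [loopB, hop]

-- ===== VERDICT (by name: the statement is the Claim_ definition above) =====
theorem pre_to_cond (cs : List Char)
    (hops : ∀ i : Nat, (h : i < cs.length) → eh_operador (cs[i]'h) = true →
      pvBal (cs.drop (i + 1)) ≤ -2) : CondOps cs := by
  intro l c r hsplit hop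
  subst hsplit
  have hi : l.length < (l ++ c :: r).length := by simp
  have hgl : (l ++ c :: r)[l.length]'hi = c := by simp
  have hdr : (l ++ c :: r).drop (l.length + 1) = r := by
    have h1 : (l ++ c :: r).drop l.length = c :: r := List.drop_left
    have h2 : (l ++ c :: r).drop (l.length + 1) = ((l ++ c :: r).drop l.length).drop 1 := by
      rw [List.drop_drop]
    rw [h2, h1, List.drop_one, List.tail_cons]
  have := hops l.length hi (by rw [hgl]; exact hop)
  rwa [hdr] at this

theorem prefixo_para_posfixa_spec : Claim_equal_prefixo_para_posfixa := by
  intro e _ hpre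
  obtain ⟨hbal, hops⟩ := hpre
  set cs := e.toList with hcs
  have hcond : CondOps cs := pre_to_cond cs hops
  have hne : cs ≠ [] := by
    intro h; rw [h] at hbal; simp [pvBal] at hbal
  obtain ⟨s, rest, hparse⟩ := parse_success cs.length cs le_rfl hne hcond
  obtain ⟨pre, hsplit, _, hfold⟩ := parse_decomp cs.length cs s rest hparse
  -- B returns s
  have hB : prefixo_para_posfixa_alt e = s := by
    have := loop_via_parse cs.length cs s rest hparse []
    simp only [reduceB] at this
    simp [prefixo_para_posfixa_alt, ← hcs, this]
  -- A returns s: process rest first (right-to-left), then pre pushes s on top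
  have hcondrest : CondOps rest := condOps_suffix pre rest (hsplit ▸ hcond)
  obtain ⟨st', hst'1, _⟩ := foldR rest.reverse [] (by
    intro l c r hsplit' hop
    have hrest : rest = r.reverse ++ c :: l.reverse := by
      have := congrArg List.reverse hsplit'
      simpa using this
    have := hcondrest r.reverse c l.reverse hrest hop
    rw [pvBal_reverse] at this
    simp; omega)
  have hrev : cs.reverse = rest.reverse ++ pre.reverse := by
    rw [hsplit]; simp
  have hA : prefixo_para_posfixa e = s := by
    simp [prefixo_para_posfixa, ← hcs, hrev, List.foldlM_append, hst'1, hfold]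
  simp [Spec_prefixo_para_posfixa, hA, hB]
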